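-- pv_equiv track=rewrite | github.com/camunda/orchestration-cluster-api-python | hooks_v2/post_gen/10_raise_exceptions.py | _rewrite_docstring
-- ===== SOURCE A (Python) =====
-- def _rewrite_docstring(docstring: str, return_type_str: str, raise_lines: list[str]) -> str:
--     lines = docstring.splitlines()
--     if not lines:
--         return docstring
--
--     def is_section_header(line: str) -> bool:
--         stripped = line.strip()
--         return stripped.endswith(":") and stripped[:-1] in {"Args", "Raises", "Returns", "Attributes"}
--
--     def find_section(name: str) -> int | None:
--         for i, line in enumerate(lines):
--             if line.strip() == f"{name}:":
--                 return i
--         return None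
--
--     # Replace/insert Raises section to list typed exceptions
--     raises_i = find_section("Raises")
--     returns_i = find_section("Returns")
--     indent = "    "
--
--     new_raises_block = ["", "Raises:"]
--     new_raises_block.extend([f"{indent}{line}" for line in raise_lines])
--     new_raises_block.append(f"{indent}httpx.TimeoutException: If the request takes longer than Client.timeout.")
--
--     if raises_i is None:
--         insert_at = returns_i if returns_i is not None else len(lines)
--         lines[insert_at:insert_at] = new_raises_block
--     else:
--         content_start = raises_i + 1
--         content_end = content_start
--         while content_end < len(lines) and not is_section_header(lines[content_end]):
--             content_end += 1
--         # replace from just before Raises: (keeping any single preceding blank line stable)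
--         # We will replace the section header + its content.
--         section_start = raises_i
--         # remove a blank line right before Raises: if present, we insert our own
--         if section_start > 0 and lines[section_start - 1].strip() == "":
--             section_start -= 1
--         lines[section_start:content_end] = new_raises_block
--
--     # Update Returns section to match the rewritten return annotation.
--     returns_i = find_section("Returns")
--     if returns_i is not None:
--         content_start = returns_i + 1
--         content_end = content_start
--         while content_end < len(lines) and not is_section_header(lines[content_end]):
--             content_end += 1
--
--         # Determine indentation to use for the content line
--         indent = "    "
--         if content_start < len(lines) and lines[content_start].strip() != "":
--             indent = lines[content_start][: len(lines[content_start]) - len(lines[content_start].lstrip())]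
--
--         lines[content_start:content_end] = [f"{indent}{return_type_str}"]
--
--     return "\n".join(lines)
-- ===== SOURCE B (Python) =====
-- _HEADERS = ("Args:", "Raises:", "Returns:", "Attributes:")
--
--
-- def _is_header(line):
--     return line.strip() in _HEADERS
--
--
-- def _rewrite_docstring(docstring: str, return_type_str: str, raise_lines: list[str]) -> str:
--     lines = docstring.splitlines()
--     if not lines:
--         return docstring
--
--     block = ["", "Raises:"]
--     block += ["    " + line for line in raise_lines]
--     block.append("    httpx.TimeoutException: If the request takes longer than Client.timeout.")
--
--     # Pass 1: one forward scan replacing the first Raises section (and the single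
--     # blank line right before it) with the new block; state machine, no indices.
--     out = []
--     mode = "scan"
--     for line in lines:
--         if mode == "scan":
--             if line.strip() == "Raises:":
--                 if out and out[-1].strip() == "":
--                     out.pop()
--                 out += block
--                 mode = "skip"
--             else:
--                 out.append(line)
--         elif mode == "skip":
--             if _is_header(line):
--                 out.append(line)
--                 mode = "done"
--         else:
--             out.append(line)
--     if mode == "scan":
--         # No Raises section: insert the block before the first Returns header,
--         # or append it at the end.
--         res = []
--         inserted = False
--         for line in out:
--             if not inserted and line.strip() == "Returns:":
--                 res += block
--                 inserted = True
--             res.append(line)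
--         if not inserted:
--             res += block
--         out = res
--
--     # Pass 2: one forward scan rewriting the first Returns section's content.
--     res = []
--     mode = "scan"
--     for line in out:
--         if mode == "scan":
--             res.append(line)
--             if line.strip() == "Returns:":
--                 mode = "head"
--         elif mode == "head":
--             if line.strip() != "":
--                 indent = line[: len(line) - len(line.lstrip())]
--             else:
--                 indent = "    "
--             res.append(indent + return_type_str)
--             if _is_header(line):
--                 res.append(line)
--                 mode = "done"
--             else:
--                 mode = "skip"
--         elif mode == "skip":
--             if _is_header(line):
--                 res.append(line)
--                 mode = "done"
--         else:
--             res.append(line)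
--     if mode == "head":
--         res.append("    " + return_type_str)
--
--     return "\n".join(res)
-- ===== Notes on version B (the rewrite author's own statement) =====
-- stated objective: alternative
-- what changed: A locates sections by repeated index searches (find_section, a while-loop index scan, slice-assignment splices and a post-splice re-find); B instead makes two single forward passes over the lines with a small state machine (scan/skip/done and scan/head/skip/done), replacing the first Raises section and rewriting the first Returns content on the fly, with no index arithmetic and no re-find.
import Mathlib
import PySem

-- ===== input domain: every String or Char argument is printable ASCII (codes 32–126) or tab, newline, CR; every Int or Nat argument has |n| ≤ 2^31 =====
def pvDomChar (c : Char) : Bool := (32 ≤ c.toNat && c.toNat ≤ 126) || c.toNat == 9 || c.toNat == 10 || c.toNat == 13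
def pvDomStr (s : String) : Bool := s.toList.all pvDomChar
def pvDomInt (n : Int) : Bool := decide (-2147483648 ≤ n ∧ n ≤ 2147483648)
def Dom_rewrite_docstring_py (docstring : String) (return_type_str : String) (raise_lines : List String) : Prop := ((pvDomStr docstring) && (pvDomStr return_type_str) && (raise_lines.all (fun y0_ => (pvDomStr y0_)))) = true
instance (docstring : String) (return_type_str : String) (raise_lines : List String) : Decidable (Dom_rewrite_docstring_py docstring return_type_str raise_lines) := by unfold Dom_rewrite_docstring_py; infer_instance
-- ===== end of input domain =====

-- B is a different decomposition of the same rewrite: two single forward scans with a small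
-- state machine (no index arithmetic, no splices, no re-find), same return value as A.

-- ===== PORT A =====
-- is_section_header: stripped.endswith(":") and stripped[:-1] in {...}
def pvIsSectionHeaderA (line : String) : Bool :=
  let stripped := PySem.Str.strip line
  PySem.Str.endswith stripped ":" &&
    ["Args", "Raises", "Returns", "Attributes"].contains (PySem.Str.slice stripped none (some (-1)))

-- find_section: for i, line in enumerate(lines): if line.strip() == f"{name}:": return i
def pvFindSecAux (name : String) : List String → Nat → Option Nat
  | [], _ => none
  | l :: ls, i => if PySem.Str.strip l == name ++ ":" then some i else pvFindSecAux name ls (i + 1)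

-- while content_end < len(lines) and not is_section_header(lines[content_end]): content_end += 1
def pvScanEnd (lines : List String) (k : Nat) : Nat :=
  if h : k < lines.length then
    if pvIsSectionHeaderA lines[k] then k else pvScanEnd lines (k + 1)
  else k
termination_by lines.length - k

def rewrite_docstring_py (docstring : String) (return_type_str : String) (raise_lines : List String) : String :=
  let lines := PySem.Str.splitlines docstring
  if lines = [] then docstring
  else
    let raises_i := pvFindSecAux "Raises" lines 0
    let returns_i := pvFindSecAux "Returns" lines 0
    let indent := "    "
    let new_raises_block :=
      ["", "Raises:"] ++ raise_lines.map (fun line => indent ++ line) ++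
        [indent ++ "httpx.TimeoutException: If the request takes longer than Client.timeout."]
    -- lines[a:b] = block  ↦  take a ++ block ++ drop b
    let lines1 :=
      match raises_i with
      | none =>
        let insert_at := match returns_i with | some r => r | none => lines.length
        lines.take insert_at ++ new_raises_block ++ lines.drop insert_at
      | some i =>
        let content_end := pvScanEnd lines (i + 1)
        -- lines[section_start - 1] is in range because of the guard i > 0 (getD default unreachable)
        let section_start := if decide (i > 0) && (PySem.Str.strip (lines.getD (i - 1) "") == "") then i - 1 else i
        lines.take section_start ++ new_raises_block ++ lines.drop content_end
    let returns_i2 := pvFindSecAux "Returns" lines1 0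
    match returns_i2 with
    | none => PySem.Str.join "\n" lines1
    | some i =>
      let content_start := i + 1
      let content_end := pvScanEnd lines1 content_start
      -- indent = lines[content_start][: len(line) - len(line.lstrip())] (guarded, getD default unreachable)
      let indent2 :=
        if decide (content_start < lines1.length) && (PySem.Str.strip (lines1.getD content_start "") != "") then
          let l := lines1.getD content_start ""
          PySem.Str.slice l none (some (PySem.Str.len l - PySem.Str.len (PySem.Str.lstrip l)))
        else "    "
      PySem.Str.join "\n" (lines1.take content_start ++ [indent2 ++ return_type_str] ++ lines1.drop content_end)

-- ===== PORT B =====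
def pvIsHeaderB (line : String) : Bool :=
  ["Args:", "Raises:", "Returns:", "Attributes:"].contains (PySem.Str.strip line)

-- if out and out[-1].strip() == "": out.pop()
def pvDropBlank (out : List String) : List String :=
  match out.getLast? with
  | some l => if PySem.Str.strip l == "" then out.dropLast else out
  | none => out

-- pass-1 loop body (mode ∈ {"scan","skip","done"})
def pvPass1Step (block : List String) : String × List String → String → String × List String
  | (mode, out), line =>
    if mode == "scan" then
      if PySem.Str.strip line == "Raises:" then ("skip", pvDropBlank out ++ block)
      else (mode, out ++ [line])
    else if mode == "skip" then
      if pvIsHeaderB line then ("done", out ++ [line]) else (mode, out)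
    else (mode, out ++ [line])

-- insertion loop body (flag = inserted)
def pvInsStep (block : List String) : Bool × List String → String → Bool × List String
  | (inserted, res), line =>
    if !inserted && (PySem.Str.strip line == "Returns:") then (true, res ++ block ++ [line])
    else (inserted, res ++ [line])

-- pass-2 loop body (mode ∈ {"scan","head","skip","done"})
def pvPass2Step (rts : String) : String × List String → String → String × List String
  | (mode, res), line =>
    if mode == "scan" then
      let res := res ++ [line]
      if PySem.Str.strip line == "Returns:" then ("head", res) else (mode, res)
    else if mode == "head" then
      let indent :=
        if PySem.Str.strip line != "" then
          PySem.Str.slice line none (some (PySem.Str.len line - PySem.Str.len (PySem.Str.lstrip line)))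
        else "    "
      let res := res ++ [indent ++ rts]
      if pvIsHeaderB line then ("done", res ++ [line]) else ("skip", res)
    else if mode == "skip" then
      if pvIsHeaderB line then ("done", res ++ [line]) else (mode, res)
    else (mode, res ++ [line])

def rewrite_docstring_py_alt (docstring : String) (return_type_str : String) (raise_lines : List String) : String :=
  let lines := PySem.Str.splitlines docstring
  if lines = [] then docstring
  else
    let block := ["", "Raises:"] ++ raise_lines.map (fun line => "    " ++ line) ++
      ["    httpx.TimeoutException: If the request takes longer than Client.timeout."]
    let p1 := lines.foldl (pvPass1Step block) ("scan", [])
    let out :=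
      if p1.1 == "scan" then
        let ins := p1.2.foldl (pvInsStep block) (false, [])
        if !ins.1 then ins.2 ++ block else ins.2
      else p1.2
    let p2 := out.foldl (pvPass2Step return_type_str) ("scan", [])
    let res := if p2.1 == "head" then p2.2 ++ ["    " ++ return_type_str] else p2.2
    PySem.Str.join "\n" res

-- ===== PRECONDITION & SPEC =====
def Spec_rewrite_docstring_py (docstring : String) (return_type_str : String) (raise_lines : List String) (out : String) : Prop := out = rewrite_docstring_py_alt docstring return_type_str raise_lines
instance (docstring : String) (return_type_str : String) (raise_lines : List String) (out : String) : Decidable (Spec_rewrite_docstring_py docstring return_type_str raise_lines out) := by unfold Spec_rewrite_docstring_py; infer_instance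

-- ===== CLAIM (what is proved, stated in full; the proofs are below) =====
def Claim_equal_rewrite_docstring_py : Prop := ∀ (docstring : String) (return_type_str : String) (raise_lines : List String), Dom_rewrite_docstring_py docstring return_type_str raise_lines → Spec_rewrite_docstring_py docstring return_type_str raise_lines (rewrite_docstring_py docstring return_type_str raise_lines)

-- ===== LEMMAS AND PROOFS =====

-- step equations of the B-side loop bodies (all definitional)
theorem step1_scan (block : List String) (out : List String) (line : String) :
    pvPass1Step block ("scan", out) line =
      if PySem.Str.strip line == "Raises:" then ("skip", pvDropBlank out ++ block)
      else ("scan", out ++ [line]) := rfl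

theorem step1_skip (block : List String) (out : List String) (line : String) :
    pvPass1Step block ("skip", out) line =
      if pvIsHeaderB line then ("done", out ++ [line]) else ("skip", out) := rfl

theorem step1_done (block : List String) (out : List String) (line : String) :
    pvPass1Step block ("done", out) line = ("done", out ++ [line]) := rfl

theorem stepIns_false (block : List String) (res : List String) (line : String) :
    pvInsStep block (false, res) line =
      if PySem.Str.strip line == "Returns:" then (true, res ++ block ++ [line])
      else (false, res ++ [line]) := rfl

theorem stepIns_true (block : List String) (res : List String) (line : String) :
    pvInsStep block (true, res) line = (true, res ++ [line]) := rfl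

-- the indentation taken from a content line (the shared subexpression of both ports)
def pvIndent (line : String) : String :=
  if PySem.Str.strip line != "" then
    PySem.Str.slice line none (some (PySem.Str.len line - PySem.Str.len (PySem.Str.lstrip line)))
  else "    "

theorem step2_scan (rts : String) (res : List String) (line : String) :
    pvPass2Step rts ("scan", res) line =
      if PySem.Str.strip line == "Returns:" then ("head", res ++ [line])
      else ("scan", res ++ [line]) := rfl

theorem step2_head (rts : String) (res : List String) (line : String) :
    pvPass2Step rts ("head", res) line =
      if pvIsHeaderB line then ("done", (res ++ [pvIndent line ++ rts]) ++ [line])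
      else ("skip", res ++ [pvIndent line ++ rts]) := rfl

theorem step2_skip (rts : String) (res : List String) (line : String) :
    pvPass2Step rts ("skip", res) line =
      if pvIsHeaderB line then ("done", res ++ [line]) else ("skip", res) := rfl

theorem step2_done (rts : String) (res : List String) (line : String) :
    pvPass2Step rts ("done", res) line = ("done", res ++ [line]) := rfl

theorem hcolonR : ("Raises" : String) ++ ":" = "Raises:" := by decide

theorem hcolonRet : ("Returns" : String) ++ ":" = "Returns:" := by decide

-- the two header tests agree on every string
theorem hdrAB (l : String) : pvIsSectionHeaderA l = pvIsHeaderB l := by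
  have key : ∀ s : String,
      (PySem.Str.endswith s ":" &&
        (["Args", "Raises", "Returns", "Attributes"] : List String).contains
          (PySem.Str.slice s none (some (-1)))) =
      (["Args:", "Raises:", "Returns:", "Attributes:"] : List String).contains s := by
    intro s
    by_cases hc : s ∈ (["Args:", "Raises:", "Returns:", "Attributes:"] : List String)
    · rcases (by simpa using hc : s = "Args:" ∨ s = "Raises:" ∨ s = "Returns:" ∨ s = "Attributes:")
        with h | h | h | h <;> (subst h; decide)
    · have hcf : (["Args:", "Raises:", "Returns:", "Attributes:"] : List String).contains s = false := by
        simpa using hc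
      rw [hcf]
      by_cases he : PySem.Str.endswith s ":" = true
      · have h1 : PySem.Chars.endswith s.toList (":" : String).toList = true := by simpa using he
        have hsuf : [':'] <:+ s.toList := by
          have h2 := (PySem.Chars.endswith_iff _ _).mp h1
          simpa [show (":" : String).toList = [':'] from by decide] using h2
        obtain ⟨q, hq⟩ := hsuf
        have hsl : (PySem.Str.slice s none (some (-1))).toList = q := by
          rw [PySem.Str.slice_to_neg_one, ← hq]
          exact List.dropLast_concat
        have mklem : ∀ t u : String, PySem.Str.slice s none (some (-1)) = t →
            t.toList ++ [':'] = u.toList → s = u := by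
          intro t u ht hu
          apply String.toList_inj.mp
          rw [← hq, ← hsl, ht, hu]
        have hres : (["Args", "Raises", "Returns", "Attributes"] : List String).contains
            (PySem.Str.slice s none (some (-1))) = false := by
          cases hx : (["Args", "Raises", "Returns", "Attributes"] : List String).contains
              (PySem.Str.slice s none (some (-1)))
          · rfl
          · exfalso
            have hmem : PySem.Str.slice s none (some (-1)) ∈
                (["Args", "Raises", "Returns", "Attributes"] : List String) := by simpa using hx
            rcases (by simpa using hmem :
                PySem.Str.slice s none (some (-1)) = "Args" ∨
                PySem.Str.slice s none (some (-1)) = "Raises" ∨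
                PySem.Str.slice s none (some (-1)) = "Returns" ∨
                PySem.Str.slice s none (some (-1)) = "Attributes") with h | h | h | h
            · rw [mklem "Args" "Args:" h (by decide)] at hc; exact hc (by decide)
            · rw [mklem "Raises" "Raises:" h (by decide)] at hc; exact hc (by decide)
            · rw [mklem "Returns" "Returns:" h (by decide)] at hc; exact hc (by decide)
            · rw [mklem "Attributes" "Attributes:" h (by decide)] at hc; exact hc (by decide)
        rw [hres, Bool.and_false]
      · have he' : PySem.Str.endswith s ":" = false := by simpa using he
        rw [he', Bool.false_and]
  unfold pvIsSectionHeaderA pvIsHeaderB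
  exact key (PySem.Str.strip l)

theorem notHdrAB : (fun l => !pvIsSectionHeaderA l) = (fun l => !pvIsHeaderB l) := by
  funext l
  rw [hdrAB]

-- find_section aux: index shift
theorem findAux_succ (name : String) (ls : List String) (i : Nat) :
    pvFindSecAux name ls (i + 1) = (pvFindSecAux name ls i).map (· + 1) := by
  induction ls generalizing i with
  | nil => rfl
  | cons l ls ih =>
    simp only [pvFindSecAux]
    by_cases h : (PySem.Str.strip l == name ++ ":") = true
    · simp [h]
    · simp only [if_neg h]
      exact ih (i + 1)

theorem findAux_none {name : String} {ls : List String} (h : pvFindSecAux name ls 0 = none) :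
    ∀ l ∈ ls, (PySem.Str.strip l == name ++ ":") = false := by
  induction ls with
  | nil => intro l hl; cases hl
  | cons a ls ih =>
    simp only [pvFindSecAux] at h
    by_cases ha : (PySem.Str.strip a == name ++ ":") = true
    · rw [if_pos ha] at h; cases h
    · rw [if_neg ha, findAux_succ] at h
      intro l hl
      rcases List.mem_cons.mp hl with rfl | hl
      · simpa using ha
      · exact ih (by simpa using h) l hl

theorem findAux_some {name : String} {ls : List String} {i : Nat}
    (h : pvFindSecAux name ls 0 = some i) :
    ∃ p r t, ls = p ++ r :: t ∧ p.length = i ∧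
      (∀ l ∈ p, (PySem.Str.strip l == name ++ ":") = false) ∧
      (PySem.Str.strip r == name ++ ":") = true := by
  induction ls generalizing i with
  | nil => cases h
  | cons a ls ih =>
    simp only [pvFindSecAux] at h
    by_cases ha : (PySem.Str.strip a == name ++ ":") = true
    · rw [if_pos ha] at h
      injection h with h0
      subst h0
      refine ⟨[], a, ls, rfl, rfl, ?_, ha⟩
      intro l hl
      cases hl
    · rw [if_neg ha, findAux_succ] at h
      obtain ⟨j, hj, hji⟩ : ∃ j, pvFindSecAux name ls 0 = some j ∧ j + 1 = i := by
        cases hf : pvFindSecAux name ls 0 with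
        | none => rw [hf] at h; simp at h
        | some j => rw [hf] at h; exact ⟨j, rfl, by simpa using h⟩
      obtain ⟨p, r, t, hls, hlen, hp, hr⟩ := ih hj
      refine ⟨a :: p, r, t, by simp [hls], by simp [hlen, hji], ?_, hr⟩
      intro l hl
      rcases List.mem_cons.mp hl with rfl | hl
      · simpa using ha
      · exact hp l hl

-- drop at pvScanEnd = dropWhile not-header of the drop
theorem drop_scanEnd (L : List String) (k : Nat) :
    L.drop (pvScanEnd L k) = (L.drop k).dropWhile (fun l => !pvIsSectionHeaderA l) := by
  have main : ∀ n k, L.length - k ≤ n →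
      L.drop (pvScanEnd L k) = (L.drop k).dropWhile (fun l => !pvIsSectionHeaderA l) := by
    intro n
    induction n with
    | zero =>
      intro k hk
      rw [pvScanEnd, dif_neg (by omega), List.drop_eq_nil_of_le (by omega)]
      rfl
    | succ n ih =>
      intro k hk
      rw [pvScanEnd]
      by_cases h : k < L.length
      · rw [dif_pos h]
        have hdk : L.drop k = L[k] :: L.drop (k + 1) := List.drop_eq_getElem_cons h
        by_cases hh : pvIsSectionHeaderA L[k] = true
        · rw [if_pos hh, hdk, List.dropWhile_cons, if_neg (by simp [hh])]
        · have hh' : pvIsSectionHeaderA L[k] = false := by simpa using hh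
          rw [if_neg hh, ih (k + 1) (by omega), hdk, List.dropWhile_cons,
            if_pos (by simp [hh'])]
      · rw [dif_neg h, List.drop_eq_nil_of_le (by omega)]
        rfl
  exact main (L.length - k) k (le_refl _)

-- pass-1 foldl characterisation
theorem p1_done (block : List String) (ls : List String) (out : List String) :
    ls.foldl (pvPass1Step block) ("done", out) = ("done", out ++ ls) := by
  induction ls generalizing out with
  | nil => simp
  | cons l ls ih => rw [List.foldl_cons, step1_done, ih]; simp

theorem p1_skip (block : List String) (ls : List String) (out : List String) :
    ((ls.foldl (pvPass1Step block) ("skip", out)).2 =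
       out ++ ls.dropWhile (fun l => !pvIsHeaderB l)) ∧
      ((ls.foldl (pvPass1Step block) ("skip", out)).1 == "scan") = false := by
  induction ls generalizing out with
  | nil => simp
  | cons l ls ih =>
    rw [List.foldl_cons, step1_skip]
    by_cases hh : pvIsHeaderB l = true
    · rw [if_pos hh, p1_done, List.dropWhile_cons, if_neg (by simp [hh])]
      simp
    · have hh' : pvIsHeaderB l = false := by simpa using hh
      rw [if_neg hh, List.dropWhile_cons, if_pos (by simp [hh'])]
      exact ih out

theorem p1_scan_none (block : List String) (ls : List String) (out : List String)
    (h : ∀ l ∈ ls, (PySem.Str.strip l == "Raises:") = false) :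
    ls.foldl (pvPass1Step block) ("scan", out) = ("scan", out ++ ls) := by
  induction ls generalizing out with
  | nil => simp
  | cons l ls ih =>
    rw [List.foldl_cons, step1_scan, if_neg (by rw [h l (by simp)]; simp),
      ih (out ++ [l]) (fun x hx => h x (by simp [hx]))]
    simp

theorem p1_scan_found (block : List String) (p : List String) (r : String) (t : List String)
    (out : List String)
    (hp : ∀ l ∈ p, (PySem.Str.strip l == "Raises:") = false)
    (hr : (PySem.Str.strip r == "Raises:") = true) :
    (p ++ r :: t).foldl (pvPass1Step block) ("scan", out) =
      t.foldl (pvPass1Step block) ("skip", pvDropBlank (out ++ p) ++ block) := by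
  induction p generalizing out with
  | nil =>
    rw [List.nil_append, List.foldl_cons, step1_scan, if_pos hr, List.append_nil]
  | cons a p ih =>
    rw [List.cons_append, List.foldl_cons, step1_scan,
      if_neg (by rw [hp a (by simp)]; simp),
      ih (out ++ [a]) (fun l hl => hp l (by simp [hl]))]
    simp

-- insert foldl characterisation
theorem ins_done (block : List String) (ls : List String) (res : List String) :
    ls.foldl (pvInsStep block) (true, res) = (true, res ++ ls) := by
  induction ls generalizing res with
  | nil => simp
  | cons l ls ih => rw [List.foldl_cons, stepIns_true, ih]; simp

theorem ins_none (block : List String) (ls : List String) (res : List String)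
    (h : ∀ l ∈ ls, (PySem.Str.strip l == "Returns:") = false) :
    ls.foldl (pvInsStep block) (false, res) = (false, res ++ ls) := by
  induction ls generalizing res with
  | nil => simp
  | cons l ls ih =>
    rw [List.foldl_cons, stepIns_false, if_neg (by rw [h l (by simp)]; simp),
      ih (res ++ [l]) (fun x hx => h x (by simp [hx]))]
    simp

theorem ins_found (block : List String) (p : List String) (r : String) (t : List String)
    (res : List String)
    (hp : ∀ l ∈ p, (PySem.Str.strip l == "Returns:") = false)
    (hr : (PySem.Str.strip r == "Returns:") = true) :
    (p ++ r :: t).foldl (pvInsStep block) (false, res) = (true, res ++ p ++ block ++ r :: t) := by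
  induction p generalizing res with
  | nil =>
    rw [List.nil_append, List.foldl_cons, stepIns_false, if_pos hr, ins_done]
    simp
  | cons a p ih =>
    rw [List.cons_append, List.foldl_cons, stepIns_false,
      if_neg (by rw [hp a (by simp)]; simp),
      ih (res ++ [a]) (fun l hl => hp l (by simp [hl]))]
    simp

-- pass-2 foldl characterisation
theorem p2_done (rts : String) (ls : List String) (res : List String) :
    ls.foldl (pvPass2Step rts) ("done", res) = ("done", res ++ ls) := by
  induction ls generalizing res with
  | nil => simp
  | cons l ls ih => rw [List.foldl_cons, step2_done, ih]; simp

theorem p2_skip (rts : String) (ls : List String) (res : List String) :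
    ((ls.foldl (pvPass2Step rts) ("skip", res)).2 =
       res ++ ls.dropWhile (fun l => !pvIsHeaderB l)) ∧
      ((ls.foldl (pvPass2Step rts) ("skip", res)).1 == "head") = false := by
  induction ls generalizing res with
  | nil => simp
  | cons l ls ih =>
    rw [List.foldl_cons, step2_skip]
    by_cases hh : pvIsHeaderB l = true
    · rw [if_pos hh, p2_done, List.dropWhile_cons, if_neg (by simp [hh])]
      simp
    · have hh' : pvIsHeaderB l = false := by simpa using hh
      rw [if_neg hh, List.dropWhile_cons, if_pos (by simp [hh'])]
      exact ih res

theorem p2_scan_none (rts : String) (ls : List String) (res : List String)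
    (h : ∀ l ∈ ls, (PySem.Str.strip l == "Returns:") = false) :
    ls.foldl (pvPass2Step rts) ("scan", res) = ("scan", res ++ ls) := by
  induction ls generalizing res with
  | nil => simp
  | cons l ls ih =>
    rw [List.foldl_cons, step2_scan, if_neg (by rw [h l (by simp)]; simp),
      ih (res ++ [l]) (fun x hx => h x (by simp [hx]))]
    simp

theorem p2_scan_found (rts : String) (p : List String) (r : String) (t : List String)
    (res : List String)
    (hp : ∀ l ∈ p, (PySem.Str.strip l == "Returns:") = false)
    (hr : (PySem.Str.strip r == "Returns:") = true) :
    (p ++ r :: t).foldl (pvPass2Step rts) ("scan", res) =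
      t.foldl (pvPass2Step rts) ("head", res ++ p ++ [r]) := by
  induction p generalizing res with
  | nil =>
    rw [List.nil_append, List.foldl_cons, step2_scan, if_pos hr]
    simp
  | cons a p ih =>
    rw [List.cons_append, List.foldl_cons, step2_scan,
      if_neg (by rw [hp a (by simp)]; simp),
      ih (res ++ [a]) (fun l hl => hp l (by simp [hl]))]
    simp

-- the two stages of B as standalone functions (definitionally the body of the B port)
def pvB1 (block : List String) (lines : List String) : List String :=
  let p1 := lines.foldl (pvPass1Step block) ("scan", [])
  if p1.1 == "scan" then
    let ins := p1.2.foldl (pvInsStep block) (false, [])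
    if !ins.1 then ins.2 ++ block else ins.2
  else p1.2

def pvB2 (rts : String) (lines1 : List String) : List String :=
  let p2 := lines1.foldl (pvPass2Step rts) ("scan", [])
  if p2.1 == "head" then p2.2 ++ ["    " ++ rts] else p2.2

theorem pvB1_nn (block : List String) {lines : List String}
    (h : pvFindSecAux "Raises" lines 0 = none)
    (h2 : pvFindSecAux "Returns" lines 0 = none) :
    pvB1 block lines = lines ++ block := by
  have hall : ∀ l ∈ lines, (PySem.Str.strip l == "Raises:") = false := by
    intro l hl; simpa [hcolonR] using findAux_none h l hl
  have hall2 : ∀ l ∈ lines, (PySem.Str.strip l == "Returns:") = false := by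
    intro l hl; simpa [hcolonRet] using findAux_none h2 l hl
  unfold pvB1
  rw [p1_scan_none block lines [] hall]
  simp only [List.nil_append]
  rw [if_pos (show ((("scan", lines) : String × List String).1 == "scan") = true from rfl)]
  rw [ins_none block lines [] hall2]
  simp

theorem pvB1_ns (block : List String) {lines : List String} {j : Nat}
    (h : pvFindSecAux "Raises" lines 0 = none)
    (h2 : pvFindSecAux "Returns" lines 0 = some j) :
    pvB1 block lines = lines.take j ++ block ++ lines.drop j := by
  have hall : ∀ l ∈ lines, (PySem.Str.strip l == "Raises:") = false := by
    intro l hl; simpa [hcolonR] using findAux_none h l hl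
  obtain ⟨p, q, t, hls, hlen, hp, hq⟩ := findAux_some h2
  replace hp : ∀ l ∈ p, (PySem.Str.strip l == "Returns:") = false := by
    intro l hl; simpa [hcolonRet] using hp l hl
  replace hq : (PySem.Str.strip q == "Returns:") = true := by simpa [hcolonRet] using hq
  subst hls
  subst hlen
  unfold pvB1
  rw [p1_scan_none block (p ++ q :: t) [] hall]
  simp only [List.nil_append]
  rw [if_pos (show ((("scan", p ++ q :: t) : String × List String).1 == "scan") = true from rfl)]
  rw [ins_found block p q t [] hp hq]
  simp only [List.nil_append]
  rw [if_neg (show ¬((!(true : Bool)) = true) from by simp)]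
  rw [List.take_left, List.drop_left]

theorem pvB1_some (block : List String) {lines : List String} {i : Nat}
    (h : pvFindSecAux "Raises" lines 0 = some i) :
    pvB1 block lines =
      lines.take (if decide (i > 0) && (PySem.Str.strip (lines.getD (i - 1) "") == "") then i - 1 else i)
        ++ block ++ lines.drop (pvScanEnd lines (i + 1)) := by
  obtain ⟨p, r, t, hls, hlen, hp, hr⟩ := findAux_some h
  replace hp : ∀ l ∈ p, (PySem.Str.strip l == "Raises:") = false := by
    intro l hl; simpa [hcolonR] using hp l hl
  replace hr : (PySem.Str.strip r == "Raises:") = true := by simpa [hcolonR] using hr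
  subst hls
  subst hlen
  unfold pvB1
  rw [p1_scan_found block p r t [] hp hr]
  simp only [List.nil_append]
  obtain ⟨hsnd, hfst⟩ := p1_skip block t (pvDropBlank p ++ block)
  rw [hfst]
  rw [if_neg (show ¬(false = true) from by simp)]
  rw [hsnd]
  have hdropc : (p ++ r :: t).drop (pvScanEnd (p ++ r :: t) (p.length + 1)) =
      t.dropWhile (fun l => !pvIsHeaderB l) := by
    rw [drop_scanEnd, notHdrAB]
    congr 1
    rw [show p ++ r :: t = (p ++ [r]) ++ t from by simp,
      show p.length + 1 = (p ++ [r]).length from by simp, List.drop_left]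
  rw [hdropc]
  rcases List.eq_nil_or_concat p with hpe | ⟨p', a, hpc⟩
  · subst hpe
    simp [pvDropBlank]
  · rw [List.concat_eq_append] at hpc
    subst hpc
    have hgd : (p' ++ [a] ++ r :: t).getD ((p' ++ [a]).length - 1) "" = a := by
      rw [List.getD_eq_getElem _ _ (by simp)]
      rw [List.getElem_append_left (by simp)]
      simp
    rw [hgd]
    rw [show decide ((p' ++ [a]).length > 0) = true from by simp, Bool.true_and]
    have hdb : pvDropBlank (p' ++ [a]) =
        if (PySem.Str.strip a == "") = true then p' else p' ++ [a] := by
      unfold pvDropBlank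
      rw [List.getLast?_concat]
      show (if (PySem.Str.strip a == "") = true then (p' ++ [a]).dropLast else p' ++ [a]) = _
      rw [List.dropLast_concat]
    rw [hdb]
    by_cases hb : (PySem.Str.strip a == "") = true
    · rw [if_pos hb, if_pos hb]
      rw [show (p' ++ [a]).length - 1 = p'.length from by simp,
        show p' ++ [a] ++ r :: t = p' ++ ([a] ++ r :: t) from by simp, List.take_left]
    · rw [if_neg hb, if_neg hb, List.take_left]

theorem pvB2_none (rts : String) {lines1 : List String}
    (h : pvFindSecAux "Returns" lines1 0 = none) :
    pvB2 rts lines1 = lines1 := by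
  have hall : ∀ l ∈ lines1, (PySem.Str.strip l == "Returns:") = false := by
    intro l hl; simpa [hcolonRet] using findAux_none h l hl
  unfold pvB2
  rw [p2_scan_none rts lines1 [] hall]
  simp only [List.nil_append]
  rw [if_neg (show ¬((("scan" : String) == "head") = true) from by decide)]

theorem pvB2_some (rts : String) {lines1 : List String} {i : Nat}
    (h : pvFindSecAux "Returns" lines1 0 = some i) :
    pvB2 rts lines1 =
      lines1.take (i + 1) ++
        [(if decide (i + 1 < lines1.length) && (PySem.Str.strip (lines1.getD (i + 1) "") != "") then
            PySem.Str.slice (lines1.getD (i + 1) "") none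
              (some (PySem.Str.len (lines1.getD (i + 1) "") -
                PySem.Str.len (PySem.Str.lstrip (lines1.getD (i + 1) ""))))
          else "    ") ++ rts] ++ lines1.drop (pvScanEnd lines1 (i + 1)) := by
  obtain ⟨p, r, t, hls, hlen, hp, hr⟩ := findAux_some h
  replace hp : ∀ l ∈ p, (PySem.Str.strip l == "Returns:") = false := by
    intro l hl; simpa [hcolonRet] using hp l hl
  replace hr : (PySem.Str.strip r == "Returns:") = true := by simpa [hcolonRet] using hr
  subst hls
  subst hlen
  unfold pvB2
  rw [p2_scan_found rts p r t [] hp hr]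
  simp only [List.nil_append]
  have htake : (p ++ r :: t).take (p.length + 1) = p ++ [r] := by
    rw [show p ++ r :: t = (p ++ [r]) ++ t from by simp,
      show p.length + 1 = (p ++ [r]).length from by simp, List.take_left]
  cases t with
  | nil =>
    simp only [List.foldl_nil]
    rw [if_pos (show ((("head", p ++ [r]) : String × List String).1 == "head") = true from rfl)]
    rw [htake]
    rw [show (decide (p.length + 1 < (p ++ r :: ([] : List String)).length) &&
        (PySem.Str.strip ((p ++ r :: ([] : List String)).getD (p.length + 1) "") != "")) = false
      from by simp]
    rw [if_neg (show ¬(false = true) from by simp)]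
    rw [show (p ++ r :: ([] : List String)).drop
        (pvScanEnd (p ++ r :: ([] : List String)) (p.length + 1)) = [] from by
      rw [drop_scanEnd, List.drop_eq_nil_of_le (by simp)]; rfl]
    simp
  | cons l t' =>
    rw [List.foldl_cons, step2_head]
    have hgd : (p ++ r :: l :: t').getD (p.length + 1) "" = l := by
      rw [List.getD_eq_getElem _ _ (by simp)]
      rw [List.getElem_append_right (by omega)]
      simp
    have hdropc : (p ++ r :: l :: t').drop (pvScanEnd (p ++ r :: l :: t') (p.length + 1)) =
        (l :: t').dropWhile (fun x => !pvIsHeaderB x) := by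
      rw [drop_scanEnd, notHdrAB]
      congr 1
      rw [show p ++ r :: l :: t' = (p ++ [r]) ++ l :: t' from by simp,
        show p.length + 1 = (p ++ [r]).length from by simp, List.drop_left]
    rw [hgd, hdropc, htake]
    rw [show decide (p.length + 1 < (p ++ r :: l :: t').length) = true from by simp,
      Bool.true_and]
    have hind : (if PySem.Str.strip l != "" then
        PySem.Str.slice l none (some (PySem.Str.len l - PySem.Str.len (PySem.Str.lstrip l)))
      else "    ") = pvIndent l := rfl
    rw [hind]
    by_cases hh : pvIsHeaderB l = true
    · rw [if_pos hh, p2_done]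
      rw [if_neg (show ¬((("done" : String) == "head") = true) from by decide)]
      rw [List.dropWhile_cons, if_neg (by simp [hh])]
      simp
    · have hh' : pvIsHeaderB l = false := by simpa using hh
      rw [if_neg hh]
      obtain ⟨hs2, hf2⟩ := p2_skip rts t' (p ++ [r] ++ [pvIndent l ++ rts])
      rw [hf2]
      rw [if_neg (show ¬(false = true) from by simp)]
      rw [hs2]
      rw [List.dropWhile_cons, if_pos (by simp [hh'])]

-- the B port is the composition of the two stages
theorem altB (d rts : String) (rl : List String) (hnil : PySem.Str.splitlines d ≠ []) :
    rewrite_docstring_py_alt d rts rl =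
      PySem.Str.join "\n"
        (pvB2 rts (pvB1 (["", "Raises:"] ++ rl.map (fun line => ("    " : String) ++ line) ++
          ["    httpx.TimeoutException: If the request takes longer than Client.timeout."])
          (PySem.Str.splitlines d))) := by
  unfold rewrite_docstring_py_alt pvB1 pvB2
  rw [if_neg hnil]

-- the A port computes the same composition
theorem A_eq (d rts : String) (rl : List String) (hnil : PySem.Str.splitlines d ≠ []) :
    rewrite_docstring_py d rts rl =
      PySem.Str.join "\n"
        (pvB2 rts (pvB1 (["", "Raises:"] ++ rl.map (fun line => ("    " : String) ++ line) ++
          ["    httpx.TimeoutException: If the request takes longer than Client.timeout."])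
          (PySem.Str.splitlines d))) := by
  unfold rewrite_docstring_py
  rw [if_neg hnil]
  dsimp only
  rw [show ("    " : String) ++ "httpx.TimeoutException: If the request takes longer than Client.timeout." =
    "    httpx.TimeoutException: If the request takes longer than Client.timeout." from by decide]
  generalize PySem.Str.splitlines d = L
  generalize (["", "Raises:"] ++ rl.map (fun line => ("    " : String) ++ line) ++
    ["    httpx.TimeoutException: If the request takes longer than Client.timeout."] : List String) = blk
  cases hf : pvFindSecAux "Raises" L 0 with
  | none =>
    cases hr2 : pvFindSecAux "Returns" L 0 with
    | none =>
      rw [pvB1_nn blk hf hr2]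
      simp only [List.take_length, List.drop_length, List.append_nil]
      split
      · next heq => rw [pvB2_none rts heq]
      · next j heq => rw [pvB2_some rts heq]
    | some j =>
      rw [pvB1_ns blk hf hr2]
      split
      · next heq => rw [pvB2_none rts heq]
      · next j2 heq => rw [pvB2_some rts heq]
  | some i =>
    rw [pvB1_some blk hf]
    split
    · next heq => rw [pvB2_none rts heq]
    · next j heq => rw [pvB2_some rts heq]

-- ===== VERDICT (by name: the statement is the Claim_ definition above) =====
theorem rewrite_docstring_py_spec : Claim_equal_rewrite_docstring_py := by
  unfold Claim_equal_rewrite_docstring_py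
  intro docstring return_type_str raise_lines _
  unfold Spec_rewrite_docstring_py
  by_cases hnil : PySem.Str.splitlines docstring = []
  · unfold rewrite_docstring_py rewrite_docstring_py_alt
    rw [if_pos hnil, if_pos hnil]
  · rw [A_eq docstring return_type_str raise_lines hnil,
      altB docstring return_type_str raise_lines hnil]
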